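-- pv_equiv track=rewrite | github.com/Alexander3243/alexander_sylka_dz | alexander_sylka_dz_3.py | sort_alpha
-- ===== SOURCE A (Python) =====
-- def sort_alpha(line):
--     result = ""
--     for i in sorted(line.upper()):
--         if i in line:
--             result += i
--         else:
--             result += i.lower()
--     return result
-- ===== SOURCE B (Python) =====
-- def sort_alpha(line):
--     # Counting sort over the 128 ASCII codes: tally the uppercased chars,
--     # then emit each code's run in ascending order, lowercased when the
--     # char is absent from the original line.
--     counts = [0] * 128
--     for c in line.upper():
--         counts[ord(c)] += 1
--     present = set(line)
--     pieces = []
--     for code in range(128):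
--         if counts[code]:
--             ch = chr(code)
--             pieces.append((ch if ch in present else ch.lower()) * counts[code])
--     return ''.join(pieces)
-- ===== Notes on version B (the rewrite author's own statement) =====
-- stated objective: faster
-- what changed: Replaces sort-then-scan (sorted(line.upper()) with a per-char substring membership test and string concatenation) by a counting sort: tally the 128 ASCII codes in one pass, precompute the present-set once, then emit each code's run in ascending order with a join.
import Mathlib
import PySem

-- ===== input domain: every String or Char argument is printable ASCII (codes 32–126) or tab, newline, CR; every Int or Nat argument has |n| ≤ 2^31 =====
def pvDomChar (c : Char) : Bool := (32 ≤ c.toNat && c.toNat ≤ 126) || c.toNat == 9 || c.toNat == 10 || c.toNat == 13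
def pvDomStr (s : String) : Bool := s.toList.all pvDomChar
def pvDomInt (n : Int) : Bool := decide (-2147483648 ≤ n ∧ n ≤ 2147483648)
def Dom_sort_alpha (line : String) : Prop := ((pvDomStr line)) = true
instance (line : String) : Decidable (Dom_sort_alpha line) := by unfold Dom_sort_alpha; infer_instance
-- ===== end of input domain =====

-- B replaces sort-then-scan by a counting sort over the 128 ASCII codes: tally the uppercased chars, then emit each code's run in order, lowercased when absent from the original (alternative algorithm).


-- ===== PORT A =====
-- result = ""; for i in sorted(line.upper()): result += i if i in line else i.lower()
-- ('i in line' with i a single char is char membership; ported as contains on the char list)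
def sort_alpha (line : String) : String :=
  (PySem.List.sorted (PySem.Str.upper line).toList (fun c => c) false).foldl
    (fun result i =>
      if line.toList.contains i then result ++ String.singleton i
      else result ++ String.singleton (PySem.Chars.lowerChar i)) ""

-- ===== PORT B =====
-- counts = [0]*128; for c in line.upper(): counts[ord(c)] += 1
-- present = set(line)
-- pieces = []; for code in range(128):
--   if counts[code]: pieces.append((ch if ch in present else ch.lower()) * counts[code])  (ch = chr(code))
-- return ''.join(pieces)   — the single-char string repetition 'ch * counts[code]' is pyRepeat
-- on the singleton char list; ''.join is Chars.join with empty separator (exact on these strings)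
def sort_alpha_alt (line : String) : String :=
  let counts := (PySem.Str.upper line).toList.foldl
    (fun cnts c => PySem.List.pySetD cnts (c.toNat : Int)
        (PySem.List.pyGetD cnts (c.toNat : Int) 0 + 1))
    (List.replicate 128 (0 : Int))
  let present := PySem.Set.ofList line.toList
  let pieces := (PySem.List.pyRange 0 128 1).foldl
    (fun ps code =>
      if PySem.List.pyGetD counts code 0 ≠ 0 then
        ps ++ [PySem.List.pyRepeat
          [if present.contains (Char.ofNat code.toNat) then Char.ofNat code.toNat
           else PySem.Chars.lowerChar (Char.ofNat code.toNat)]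
          (PySem.List.pyGetD counts code 0)]
      else ps) []
  String.ofList (PySem.Chars.join [] pieces)

-- ===== PRECONDITION & SPEC =====
def Spec_sort_alpha (line : String) (out : String) : Prop := out = sort_alpha_alt line
instance (line : String) (out : String) : Decidable (Spec_sort_alpha line out) := by unfold Spec_sort_alpha; infer_instance

-- ===== CLAIM (what is proved, stated in full; the proofs are below) =====
def Claim_equal_sort_alpha : Prop := ∀ (line : String), Dom_sort_alpha line → Spec_sort_alpha line (sort_alpha line)

-- ===== LEMMAS AND PROOFS =====

-- A's branchy string-append loop emits one char per element: its char list is the mapped list.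
theorem foldl_str_append (P : Char → Bool) (g : Char → Char) (l : List Char) (s : String) :
    (l.foldl (fun result i =>
        if P i then result ++ String.singleton i
        else result ++ String.singleton (g i)) s).toList
      = s.toList ++ l.map (fun i => if P i then i else g i) := by
  induction l generalizing s with
  | nil => simp
  | cons c t ih =>
    simp only [List.foldl_cons, List.map_cons]
    by_cases hP : P c
    · rw [if_pos hP, ih, if_pos hP]; simp
    · rw [if_neg hP, ih, if_neg hP]; simp

-- ''.join: joining with the empty separator is flattening
theorem join_empty_sep (l : List (List Char)) : PySem.Chars.join [] l = l.flatten := by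
  unfold PySem.Chars.join List.intercalate
  induction l with
  | nil => rfl
  | cons a t ih => cases t with
    | nil => rfl
    | cons b t2 => simp [List.intersperse] at ih ⊢; exact ih

theorem set_ofList_contains (xs : List Char) (c : Char) :
    (PySem.Set.ofList xs).contains c = xs.contains c := by
  by_cases h : c ∈ xs <;> simp [PySem.Set.contains, PySem.Set.mem_ofList, h]

theorem char_toNat_ofNat (k : Nat) (hk : k < 128) : (Char.ofNat k).toNat = k := by
  rw [Char.toNat_ofNat, if_pos (Or.inl (by omega))]

theorem char_ofNat_le (k k' : Nat) (hk : k < 128) (hk' : k' < 128) (h : k ≤ k') :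
    Char.ofNat k ≤ Char.ofNat k' := by
  rw [Char.le_def, UInt32.le_iff_toNat_le]
  show (Char.ofNat k).toNat ≤ (Char.ofNat k').toNat
  rw [char_toNat_ofNat k hk, char_toNat_ofNat k' hk']; exact h

theorem char_eq_of_toNat_eq {c d : Char} (h : c.toNat = d.toNat) : c = d :=
  Char.ext (UInt32.toNat_inj.mp h)

-- chars of the uppercased line stay below 128 on the domain
theorem upper_toNat_lt (line : String) (hDom : Dom_sort_alpha line) :
    ∀ c ∈ (PySem.Str.upper line).toList, c.toNat < 128 := by
  intro c hc
  rw [PySem.Str.toList_upper] at hc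
  unfold PySem.Chars.upper at hc
  rcases List.mem_map.mp hc with ⟨d, hd, rfl⟩
  have hdom : pvDomChar d = true := by
    have := (List.all_eq_true.mp hDom) d hd
    exact this
  have hdlt : d.toNat < 128 := by
    simp [pvDomChar] at hdom; omega
  unfold PySem.Chars.upperChar
  split
  · rw [char_toNat_ofNat _ (by omega)]; omega
  · exact hdlt

-- the tally loop: counts[k] = (number of chars of u with code k) + what was there
theorem counts_fold_getD (u : List Char) (hu : ∀ c ∈ u, c.toNat < 128)
    (cnts : List Int) (hlen : cnts.length = 128) (k : Nat) (hk : k < 128) :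
    PySem.List.pyGetD (u.foldl
      (fun cnts c => PySem.List.pySetD cnts (c.toNat : Int)
        (PySem.List.pyGetD cnts (c.toNat : Int) 0 + 1)) cnts) (k : Int) 0
      = PySem.List.pyGetD cnts (k : Int) 0 + (u.countP (fun c => c.toNat == k) : Int) := by
  induction u generalizing cnts with
  | nil => simp
  | cons c t ih =>
    have hc : c.toNat < 128 := hu c List.mem_cons_self
    have hrec := ih (fun x hx => hu x (List.mem_cons_of_mem _ hx))
      (PySem.List.pySetD cnts (c.toNat : Int) (PySem.List.pyGetD cnts (c.toNat : Int) 0 + 1))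
      (by rw [PySem.List.length_pySetD]; exact hlen)
    rw [List.foldl_cons, hrec,
      PySem.List.pyGetD_pySetD_natCast cnts c.toNat k _ 0 (by omega)]
    rw [List.countP_cons]
    by_cases hkc : k = c.toNat
    · subst hkc
      rw [if_pos rfl, if_pos (by simp)]
      push_cast; ring
    · rw [if_neg hkc, if_neg (by simp; omega)]
      push_cast; ring

-- dropping the empty chunks of a chunked list does not change its flattening
theorem flatten_map_filter {α β : Type} (p : α → Bool) (g : α → List β) (l : List α)
    (h : ∀ x ∈ l, p x = false → g x = []) :
    (((l.filter p).map g)).flatten = (l.map g).flatten := by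
  induction l with
  | nil => rfl
  | cons a t ih =>
    have iht := ih (fun x hx => h x (List.mem_cons_of_mem _ hx))
    by_cases hp : p a
    · simp [hp, iht]
    · have hpf : p a = false := by simpa using hp
      simp [hpf, h a List.mem_cons_self hpf, iht]

-- counting a char in the counting-sort output
theorem count_chunks (cnt : Nat → Nat) (n : Nat) (hn : n ≤ 128) (ch : Char) :
    ((List.range n).flatMap (fun k => List.replicate (cnt k) (Char.ofNat k))).count ch
      = if ch.toNat < n then cnt ch.toNat else 0 := by
  induction n with
  | zero => simp
  | succ m ih =>
    rw [List.range_succ, List.flatMap_append, List.count_append,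
      ih (by omega)]
    simp only [List.flatMap_cons, List.flatMap_nil, List.append_nil, List.count_replicate]
    by_cases heq : ch.toNat = m
    · have hb : (Char.ofNat m == ch) = true := by
        rw [beq_iff_eq]
        exact char_eq_of_toNat_eq (by rw [char_toNat_ofNat m (by omega), heq])
      rw [hb, if_neg (by omega), if_pos rfl, if_pos (by omega), heq]
      omega
    · have hb : (Char.ofNat m == ch) = false := by
        rw [beq_eq_false_iff_ne]
        intro h; apply heq; rw [← h, char_toNat_ofNat m (by omega)]
      rw [hb]
      by_cases hlt : ch.toNat < m
      · rw [if_pos hlt, if_neg (by simp), if_pos (by omega)]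
        omega
      · rw [if_neg hlt, if_neg (by simp), if_neg (by omega)]

-- the counting-sort output (before case-fixing) IS sorted(u) for u below code 128
theorem chunks_eq_sorted (u : List Char) (hu : ∀ c ∈ u, c.toNat < 128) :
    PySem.List.sorted u (fun x => x) false
      = (List.range 128).flatMap (fun k => List.replicate (u.countP (fun c => c.toNat == k)) (Char.ofNat k)) := by
  apply PySem.List.sorted_id_eq_of_perm_of_pairwise
  · -- permutation, by counting each char
    rw [List.perm_iff_count]
    intro ch
    rw [count_chunks (fun k => u.countP (fun c => c.toNat == k)) 128 le_rfl ch]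
    by_cases hch : ch.toNat < 128
    · rw [if_pos hch, List.count_eq_countP]
      apply List.countP_congr
      intro x hx
      have : x.toNat = ch.toNat ↔ x = ch :=
        ⟨char_eq_of_toNat_eq, fun h => by rw [h]⟩
      simp [this]
    · rw [if_neg hch, Eq.comm, List.count_eq_zero]
      intro hmem
      exact hch (hu ch hmem)
  · -- sortedness: equal chars inside a chunk, increasing codes across chunks
    rw [List.flatMap_def]
    rw [List.pairwise_flatten]
    constructor
    · intro l hl
      rcases List.mem_map.mp hl with ⟨k, _, rfl⟩
      exact List.pairwise_replicate.mpr (Or.inr le_rfl)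
    · rw [List.pairwise_map]
      apply (List.pairwise_lt_range (n := 128)).imp_of_mem
      intro k1 k2 h1 h2 hlt x hx y hy
      rw [List.eq_of_mem_replicate hx, List.eq_of_mem_replicate hy]
      exact char_ofNat_le k1 k2 (List.mem_range.mp h1) (List.mem_range.mp h2) (by omega)

theorem sort_alpha_spec : Claim_equal_sort_alpha := by
  intro line hDom
  unfold Spec_sort_alpha sort_alpha sort_alpha_alt
  apply String.toList_inj.mp
  rw [foldl_str_append]
  simp only [String.toList_empty, List.nil_append, String.toList_ofList]
  -- B's pieces loop is append-if over the range
  rw [PySem.List.foldl_append_ite (fun code =>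
        PySem.List.pyGetD ((PySem.Str.upper line).toList.foldl
          (fun cnts c => PySem.List.pySetD cnts (c.toNat : Int)
            (PySem.List.pyGetD cnts (c.toNat : Int) 0 + 1))
          (List.replicate 128 (0 : Int))) code 0 ≠ 0)]
  rw [join_empty_sep, List.nil_append]
  set u := (PySem.Str.upper line).toList with hu_def
  have hu : ∀ c ∈ u, c.toNat < 128 := upper_toNat_lt line hDom
  have hcnt : ∀ k : Nat, k < 128 →
      PySem.List.pyGetD (u.foldl
        (fun cnts c => PySem.List.pySetD cnts (c.toNat : Int)
          (PySem.List.pyGetD cnts (c.toNat : Int) 0 + 1))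
        (List.replicate 128 (0 : Int))) (k : Int) 0
        = (u.countP (fun c => c.toNat == k) : Int) := by
    intro k hk
    rw [counts_fold_getD u hu _ (by simp) k hk,
      PySem.List.pyGetD_natCast, List.getD_replicate _ hk]
    ring
  -- evaluate the range, the counts lookups and the chunk contents
  rw [PySem.List.pyRange_one]
  have h128 : ((128:Int) - 0).toNat = 128 := by decide
  rw [h128]
  simp only [zero_add]
  rw [List.filter_map, List.map_map]
  set counts := List.foldl
      (fun cnts c => PySem.List.pySetD cnts ((c.toNat : Int))
        (PySem.List.pyGetD cnts ((c.toNat : Int)) 0 + 1))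
      (List.replicate 128 (0 : Int)) u with hcounts
  have hfil : List.filter ((fun x => decide (PySem.List.pyGetD counts x 0 ≠ 0)) ∘ fun k : Nat => (k : Int)) (List.range 128)
      = List.filter (fun k : Nat => decide (((List.countP (fun c => c.toNat == k) u : Int)) ≠ 0)) (List.range 128) := by
    apply List.filter_congr
    intro k hk
    simp only [Function.comp_apply]
    rw [hcnt k (List.mem_range.mp hk)]
  rw [hfil]
  have hmap : ∀ k ∈ List.filter (fun k : Nat => decide (((List.countP (fun c => c.toNat == k) u : Int)) ≠ 0)) (List.range 128),
      ((fun code => PySem.List.pyRepeat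
          [if (PySem.Set.ofList line.toList).contains (Char.ofNat code.toNat) = true then Char.ofNat code.toNat
           else PySem.Chars.lowerChar (Char.ofNat code.toNat)]
          (PySem.List.pyGetD counts code 0)) ∘ (fun k : Nat => (k : Int))) k
        = List.replicate (List.countP (fun c => c.toNat == k) u)
            (if line.toList.contains (Char.ofNat k) = true then Char.ofNat k
             else PySem.Chars.lowerChar (Char.ofNat k)) := by
    intro k hk
    have hk128 : k < 128 := List.mem_range.mp (List.mem_of_mem_filter hk)
    simp only [Function.comp_apply, Int.toNat_natCast]
    rw [hcnt k hk128, PySem.List.pyRepeat_singleton, Int.toNat_natCast, set_ofList_contains]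
  rw [List.map_congr_left hmap]
  rw [flatten_map_filter _ _ _ (by
    intro k _ hfalse
    have h0 : List.countP (fun c => c.toNat == k) u = 0 := by
      by_contra hne
      simp only [decide_eq_false_iff_not, not_not] at hfalse
      exact hne (by exact_mod_cast hfalse)
    rw [h0]
    rfl)]
  rw [chunks_eq_sorted u hu, List.map_flatMap, ← List.flatMap_def]
  simp only [List.map_replicate]
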